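-- pv_equiv track=rewrite | github.com/aniketg66/Dense-Captioning-Backend-Vercel | segregate_image.py | filter_close_cuts
-- ===== SOURCE A (Python) =====
-- def filter_close_cuts(cuts, min_dist=10):
--     if not cuts:
--         return []
--     filtered = []
--     group = [cuts[0]]
--     for c in cuts[1:]:
--         if c - group[-1] < min_dist:
--             group.append(c)
--         else:
--             # Keep the cut closest to the center of the group
--             center = group[len(group)//2]
--             filtered.append(center)
--             group = [c]
--     # Add the last group
--     if group:
--         center = group[len(group)//2]
--         filtered.append(center)
--     return filtered
-- ===== SOURCE B (Python) =====
-- def filter_close_cuts(cuts, min_dist=10):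
--     # Two-pointer index scan: no group sublists, centers picked by arithmetic indexing.
--     result = []
--     n = len(cuts)
--     i = 0
--     while i < n:
--         j = i + 1
--         while j < n and cuts[j] - cuts[j-1] < min_dist:
--             j += 1
--         result.append(cuts[i + (j - i) // 2])
--         i = j
--     return result
-- ===== Notes on version B (the rewrite author's own statement) =====
-- stated objective: alternative
-- what changed: Replaces the fold that builds explicit group sublists with a two-pointer index scan that finds each run's end index and picks its center by arithmetic indexing, allocating no intermediate group lists.
import Mathlib
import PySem

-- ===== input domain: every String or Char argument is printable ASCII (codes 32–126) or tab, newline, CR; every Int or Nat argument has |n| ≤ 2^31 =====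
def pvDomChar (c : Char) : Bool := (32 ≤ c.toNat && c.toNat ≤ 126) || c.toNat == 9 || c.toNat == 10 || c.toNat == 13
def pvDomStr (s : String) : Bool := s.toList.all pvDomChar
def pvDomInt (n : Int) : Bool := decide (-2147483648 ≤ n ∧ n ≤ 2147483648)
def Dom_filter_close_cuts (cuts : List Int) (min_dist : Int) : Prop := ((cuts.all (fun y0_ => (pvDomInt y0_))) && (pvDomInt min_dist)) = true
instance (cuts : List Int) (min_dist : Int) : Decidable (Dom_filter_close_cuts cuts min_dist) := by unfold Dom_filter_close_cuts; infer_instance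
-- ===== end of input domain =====

-- B replaces A's fold that builds explicit group sublists by a two-pointer index scan
-- picking each run's center by arithmetic indexing (objective: alternative, same cost).


-- ===== PORT A =====
-- body of A's for-loop: state = (filtered, group); group[-1] is getLast!, group[len//2] the center
def stepA (min_dist : Int) (st : List Int × List Int) (c : Int) : List Int × List Int :=
  if c - st.2.getLast! < min_dist then (st.1, st.2 ++ [c])
  else (st.1 ++ [st.2[st.2.length / 2]!], [c])

def filter_close_cuts (cuts : List Int) (min_dist : Int) : List Int :=
  match cuts with
  | [] => []
  | c0 :: rest =>
    let st := rest.foldl (stepA min_dist) ([], [c0])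
    if st.2.isEmpty then st.1 else st.1 ++ [st.2[st.2.length / 2]!]

-- ===== PORT B =====
-- inner while loop of Source B: advance j while j < n and cuts[j] - cuts[j-1] < min_dist
def altInner (min_dist : Int) (cuts : List Int) (n j : Nat) : Nat :=
  if j < n ∧ cuts[j]! - cuts[j-1]! < min_dist then altInner min_dist cuts n (j+1) else j
termination_by n - j
decreasing_by omega

-- termination fact for the outer loop (cited by altOuter's decreasing_by)
theorem altInner_ge (min_dist : Int) (cuts : List Int) (n : Nat) :
    ∀ j, j ≤ altInner min_dist cuts n j := by
  intro j
  induction j using altInner.induct (min_dist := min_dist) (cuts := cuts) (n := n) with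
  | case1 j h ih => rw [altInner, if_pos h]; omega
  | case2 j h => rw [altInner, if_neg h]

-- outer while loop of Source B: result accumulator, i jumps to j after each group
def altOuter (min_dist : Int) (cuts : List Int) (n i : Nat) (result : List Int) : List Int :=
  if i < n then
    let j := altInner min_dist cuts n (i+1)
    altOuter min_dist cuts n j (result ++ [cuts[i + (j - i) / 2]!])
  else result
termination_by n - i
decreasing_by have := altInner_ge min_dist cuts n (i+1); omega

def filter_close_cuts_alt (cuts : List Int) (min_dist : Int) : List Int :=
  altOuter min_dist cuts cuts.length 0 []

-- ===== PRECONDITION & SPEC =====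
def Spec_filter_close_cuts (cuts : List Int) (min_dist : Int) (out : List Int) : Prop := out = filter_close_cuts_alt cuts min_dist
instance (cuts : List Int) (min_dist : Int) (out : List Int) : Decidable (Spec_filter_close_cuts cuts min_dist out) := by unfold Spec_filter_close_cuts; infer_instance

-- ===== CLAIM (what is proved, stated in full; the proofs are below) =====
def Claim_equal_filter_close_cuts : Prop := ∀ (cuts : List Int) (min_dist : Int), Dom_filter_close_cuts cuts min_dist → Spec_filter_close_cuts cuts min_dist (filter_close_cuts cuts min_dist)

-- ===== LEMMAS AND PROOFS =====

-- length of the run of the list as seen from previous element `prev`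
def runLen (min_dist prev : Int) : List Int → Nat
  | [] => 0
  | c :: rest => if c - prev < min_dist then 1 + runLen min_dist c rest else 0

-- list-level reformulation of B's outer loop
def altGo (min_dist : Int) (res : List Int) : List Int → List Int
  | [] => res
  | c0 :: rl =>
    let j := 1 + runLen min_dist c0 rl
    altGo min_dist (res ++ [(c0 :: rl)[j / 2]!]) ((c0 :: rl).drop j)
termination_by l => l.length
decreasing_by simp

-- A's epilogue after the loop
def postA (st : List Int × List Int) : List Int :=
  if st.2.isEmpty then st.1 else st.1 ++ [st.2[st.2.length / 2]!]

theorem getElem!_drop (cuts : List Int) (i k : Nat) :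
    (cuts.drop i)[k]! = cuts[i + k]! := by
  by_cases h : i + k < cuts.length
  · rw [getElem!_pos (cuts.drop i) k (by simp; omega), getElem!_pos cuts (i+k) h,
      List.getElem_drop]
  · rw [getElem!_neg (cuts.drop i) k (by simp; omega), getElem!_neg cuts (i+k) h]

theorem getElem!_append_left (l₁ l₂ : List Int) (i : Nat) (h : i < l₁.length) :
    (l₁ ++ l₂)[i]! = l₁[i]! := by
  rw [getElem!_pos (l₁ ++ l₂) i (by simp; omega), getElem!_pos l₁ i h,
    List.getElem_append_left h]

theorem last_cons_cons (a b : Int) (l : List Int) :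
    (a :: b :: l).getLast! = (b :: l).getLast! := by
  simp [List.getLast!]

theorem altInner_eq (min_dist : Int) (cuts : List Int) :
    ∀ j, 1 ≤ j → altInner min_dist cuts cuts.length j
      = j + runLen min_dist (cuts[j-1]!) (cuts.drop j) := by
  intro j hj
  induction j using altInner.induct (min_dist := min_dist) (cuts := cuts) (n := cuts.length) with
  | case1 j h ih =>
    obtain ⟨hjn, hlt⟩ := h
    have hgl : cuts[j]! = cuts[j] := getElem!_pos cuts j hjn
    rw [altInner, if_pos ⟨hjn, hlt⟩, ih (by omega), List.drop_eq_getElem_cons hjn]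
    simp only [runLen]
    rw [hgl] at hlt
    rw [if_pos hlt]
    simp only [Nat.add_sub_cancel, hgl]
    omega
  | case2 j h =>
    rw [altInner, if_neg h]
    rcases Nat.lt_or_ge j cuts.length with hjn | hjn
    · have hnc : ¬ cuts[j]! - cuts[j-1]! < min_dist := fun hc => h ⟨hjn, hc⟩
      rw [List.drop_eq_getElem_cons hjn]
      simp only [runLen]
      rw [if_neg (by rwa [getElem!_pos cuts j hjn] at hnc)]
      omega
    · rw [List.drop_eq_nil_of_le hjn]
      simp [runLen]

theorem altOuter_eq (min_dist : Int) (cuts : List Int) :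
    ∀ i res, altOuter min_dist cuts cuts.length i res = altGo min_dist res (cuts.drop i) := by
  intro i res
  induction i, res using altOuter.induct (min_dist := min_dist) (cuts := cuts)
      (n := cuts.length) with
  | case1 i result h j ih =>
    have hgl : cuts[i]! = cuts[i] := getElem!_pos cuts i h
    have hJ : altInner min_dist cuts cuts.length (i + 1)
        = i + 1 + runLen min_dist cuts[i] (cuts.drop (i + 1)) := by
      rw [altInner_eq min_dist cuts (i + 1) (by omega)]
      simp [hgl]
    have key : altGo min_dist
          (result ++ [cuts[i + (altInner min_dist cuts cuts.length (i+1) - i) / 2]!])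
          (cuts.drop (altInner min_dist cuts cuts.length (i+1)))
        = altGo min_dist result (cuts.drop i) := by
      conv_rhs => rw [List.drop_eq_getElem_cons h, altGo.eq_2,
        ← List.drop_eq_getElem_cons h]
      rw [getElem!_drop, List.drop_drop]
      rw [show i + (altInner min_dist cuts cuts.length (i+1) - i) / 2
            = i + (1 + runLen min_dist cuts[i] (cuts.drop (i+1))) / 2 by omega,
          show altInner min_dist cuts cuts.length (i+1)
            = 1 + runLen min_dist cuts[i] (cuts.drop (i+1)) + i by omega]
      rw [show 1 + runLen min_dist cuts[i] (cuts.drop (i+1)) + i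
            = i + (1 + runLen min_dist cuts[i] (cuts.drop (i+1))) from by omega]
    rw [altOuter, if_pos h]
    exact Eq.trans ih key
  | case2 i result h =>
    rw [altOuter, if_neg h, List.drop_eq_nil_of_le (by omega), altGo.eq_1]

theorem runLen_append_full (min_dist : Int) :
    ∀ (gt : List Int) (g0 : Int) (l : List Int), runLen min_dist g0 gt = gt.length →
      runLen min_dist g0 (gt ++ l)
        = gt.length + runLen min_dist ((g0 :: gt).getLast!) l := by
  intro gt
  induction gt with
  | nil => intro g0 l _; simp [List.getLast!]
  | cons g1 gt ih =>
    intro g0 l hrun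
    simp only [runLen, List.length_cons] at hrun
    by_cases hc : g1 - g0 < min_dist
    · rw [if_pos hc] at hrun
      rw [List.cons_append]
      simp only [runLen]
      rw [if_pos hc, ih g1 l (by omega), last_cons_cons]
      simp only [List.length_cons]
      omega
    · rw [if_neg hc] at hrun; omega

theorem runLen_snoc (min_dist : Int) (gt : List Int) (g0 c : Int)
    (hrun : runLen min_dist g0 gt = gt.length)
    (hc : c - (g0 :: gt).getLast! < min_dist) :
    runLen min_dist g0 (gt ++ [c]) = (gt ++ [c]).length := by
  rw [runLen_append_full min_dist gt g0 [c] hrun]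
  simp only [runLen]
  rw [if_pos hc]
  simp

theorem mainA (min_dist : Int) :
    ∀ (l res gt : List Int) (g0 : Int), runLen min_dist g0 gt = gt.length →
      postA (l.foldl (stepA min_dist) (res, g0 :: gt))
        = altGo min_dist res (g0 :: (gt ++ l)) := by
  intro l
  induction l with
  | nil =>
    intro res gt g0 hrun
    rw [List.foldl_nil, postA]
    simp only [List.append_nil, List.isEmpty_cons, Bool.false_eq_true, if_false]
    have hj : 1 + runLen min_dist g0 gt = (g0 :: gt).length := by
      rw [hrun, List.length_cons]; omega
    rw [altGo.eq_2, hj, List.drop_length, altGo.eq_1]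
  | cons c l ih =>
    intro res gt g0 hrun
    rw [List.foldl_cons]
    by_cases hc : c - (g0 :: gt).getLast! < min_dist
    · have hstep : stepA min_dist (res, g0 :: gt) c = (res, g0 :: (gt ++ [c])) := by
        show (if c - (g0 :: gt).getLast! < min_dist
            then ((res : List Int), (g0 :: gt) ++ [c])
            else (res ++ [(g0 :: gt)[(g0 :: gt).length / 2]!], [c])) = _
        rw [if_pos hc]
        simp
      rw [hstep, ih res (gt ++ [c]) g0 (runLen_snoc min_dist gt g0 c hrun hc)]
      simp
    · have hstep : stepA min_dist (res, g0 :: gt) c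
          = (res ++ [(g0 :: gt)[(g0 :: gt).length / 2]!], [c]) := by
        show (if c - (g0 :: gt).getLast! < min_dist
            then ((res : List Int), (g0 :: gt) ++ [c])
            else (res ++ [(g0 :: gt)[(g0 :: gt).length / 2]!], [c])) = _
        rw [if_neg hc]
      rw [hstep, ih (res ++ [(g0 :: gt)[(g0 :: gt).length / 2]!]) [] c (by simp [runLen])]
      have hj : 1 + runLen min_dist g0 (gt ++ c :: l) = (g0 :: gt).length := by
        rw [runLen_append_full min_dist gt g0 (c :: l) hrun]
        simp only [runLen]
        rw [if_neg hc, List.length_cons]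
        omega
      conv_rhs => rw [altGo.eq_2]
      rw [hj]
      have hsplit : g0 :: (gt ++ c :: l) = (g0 :: gt) ++ (c :: l) := by simp
      rw [hsplit, getElem!_append_left _ _ _ (by simp only [List.length_cons]; omega),
        List.drop_left]
      simp

theorem ports_agree (cuts : List Int) (min_dist : Int) :
    filter_close_cuts cuts min_dist = filter_close_cuts_alt cuts min_dist := by
  cases cuts with
  | nil =>
    show ([] : List Int) = altOuter min_dist [] 0 0 []
    rw [altOuter]
    simp
  | cons c0 rest =>
    have h1 : filter_close_cuts (c0 :: rest) min_dist
        = postA (rest.foldl (stepA min_dist) ([], [c0])) := rfl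
    rw [h1, mainA min_dist rest [] [] c0 (by simp [runLen]), filter_close_cuts_alt,
      altOuter_eq min_dist (c0 :: rest) 0 []]
    simp

-- ===== VERDICT (by name: the statement is the Claim_ definition above) =====
theorem filter_close_cuts_spec : Claim_equal_filter_close_cuts := by
  intro cuts min_dist _
  unfold Spec_filter_close_cuts
  exact ports_agree cuts min_dist
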